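-- pv_equiv track=rewrite | github.com/rin-k645/algorithm | 백준/Gold/3663. 고득점/고득점.py | solution
-- ===== SOURCE A (Python) =====
-- def solution(name: str) -> int:
--     answer = 0
--     length = len(name)
--     move = length - 1 # 좌우로 갈 수 있는 최대 횟수
--
--     for cur in range(length):
--         ch = name[cur]
--         front = ord(ch) - ord('A') # 앞으로 움직였을 때 횟수
--         back = ord('Z') - ord(ch) + 1 # 뒤로 움직였을 때 횟수
--         answer += min(front, back)
--
--         # A가 아닐 때까지 끝으로 이동
--         end = cur + 1
--         while end < length and name[end] == 'A':
--             end += 1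
--
--         l1 = cur # 0 ~ 현재 위치 길이
--         l2 = length - end # 끝 ~ A가 아닌 곳까지 길이
--         move = min(move, l1 + l2 + min(l1, l2))
--
--     return answer + move
-- ===== SOURCE B (Python) =====
-- def solution(name: str) -> int:
--     n = len(name)
--     alpha = sum(min(ord(c) - ord('A'), ord('Z') - ord(c) + 1) for c in name)
--     # nxt[i] = smallest index j >= i with name[j] != 'A', or n if none
--     nxt = [n] * (n + 1)
--     for i in range(n - 1, -1, -1):
--         nxt[i] = i if name[i] != 'A' else nxt[i + 1]
--     best = n - 1
--     for cur in range(n):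
--         tail = n - nxt[cur + 1]
--         best = min(best, cur + tail + min(cur, tail))
--     return alpha + best
-- ===== Notes on version B (the rewrite author's own statement) =====
-- stated objective: alternative
-- what changed: Replaced A's inner while-scan for the next non-'A' character (run once per position, quadratic on 'A'-runs) with a next-non-'A' index array built in one backward pass, and split A's single accumulator pair into a separate character-cost sum and a movement minimum.
import Mathlib
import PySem

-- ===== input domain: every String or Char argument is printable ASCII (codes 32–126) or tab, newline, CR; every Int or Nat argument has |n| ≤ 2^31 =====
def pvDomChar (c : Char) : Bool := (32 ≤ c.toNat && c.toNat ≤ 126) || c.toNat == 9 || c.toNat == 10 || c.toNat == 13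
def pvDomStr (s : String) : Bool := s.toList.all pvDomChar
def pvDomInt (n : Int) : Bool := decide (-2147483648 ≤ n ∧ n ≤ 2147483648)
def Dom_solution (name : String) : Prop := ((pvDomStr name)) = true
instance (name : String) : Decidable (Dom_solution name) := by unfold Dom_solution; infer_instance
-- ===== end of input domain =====

-- B replaces A's per-position inner while-scan with a next-non-'A' index array built in one
-- backward pass, and splits the accumulator pair into a character-cost sum and a movement
-- minimum (objective: alternative structure). Equivalence of return values.

-- ===== PORT A =====
-- the inner `while end < length and name[end] == 'A': end += 1` loop
def solWhile (cs : List Char) (n : Int) (e : Int) : Int :=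
  if _h : e < n ∧ PySem.List.pyGet? cs e = some 'A' then solWhile cs n (e + 1) else e
termination_by (n - e).toNat
decreasing_by omega

def solution (name : String) : Int :=
  let cs := name.toList
  let length : Int := cs.length
  let r := (PySem.List.pyRange 0 length 1).foldl (fun (st : Int × Int) cur =>
      let ch := PySem.List.pyGetD cs cur 'A'   -- name[cur]; index always in range
      let front : Int := (ch.toNat : Int) - ('A'.toNat : Int)
      let back : Int := ('Z'.toNat : Int) - (ch.toNat : Int) + 1
      let answer := st.1 + min front back
      let e := solWhile cs length (cur + 1)
      let l1 := cur
      let l2 := length - e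
      let move := min st.2 (l1 + l2 + min l1 l2)
      (answer, move)) (0, length - 1)
  r.1 + r.2

-- ===== PORT B =====
-- backward pass building nxt[i..n] (nxt[i] = i if name[i] != 'A' else nxt[i+1]; nxt[n] = n)
def nxtList (cs : List Char) (i : Int) (n : Int) : List Int :=
  match cs with
  | [] => [n]
  | c :: rest =>
    let t := nxtList rest (i + 1) n
    (if c ≠ 'A' then i else t.headI) :: t

def solution_alt (name : String) : Int :=
  let cs := name.toList
  let n : Int := cs.length
  let alpha := (cs.map (fun c =>
      min ((c.toNat : Int) - ('A'.toNat : Int)) (('Z'.toNat : Int) - (c.toNat : Int) + 1))).sum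
  let nxt := nxtList cs 0 n
  let best := (PySem.List.pyRange 0 n 1).foldl (fun best cur =>
      let tail := n - PySem.List.pyGetD nxt (cur + 1) n
      min best (cur + tail + min cur tail)) (n - 1)
  alpha + best

-- ===== PRECONDITION & SPEC =====
def Spec_solution (name : String) (out : Int) : Prop := out = solution_alt name
instance (name : String) (out : Int) : Decidable (Spec_solution name out) := by unfold Spec_solution; infer_instance

-- ===== CLAIM (what is proved, stated in full; the proofs are below) =====
def Claim_equal_solution : Prop := ∀ (name : String), Dom_solution name → Spec_solution name (solution name)

-- ===== LEMMAS AND PROOFS =====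

-- spec function: first index ≥ i whose char (in the given suffix) is not 'A'
def fnA (cs : List Char) (i : Int) : Int :=
  match cs with
  | [] => i
  | c :: rest => if c = 'A' then fnA rest (i + 1) else i

theorem nxtList_length (cs : List Char) (i n : Int) :
    (nxtList cs i n).length = cs.length + 1 := by
  induction cs generalizing i with
  | nil => rfl
  | cons c rest ih => simp [nxtList, ih]

theorem nxtList_get (cs : List Char) (i n : Int) (k : Nat)
    (hn : n = i + cs.length) (hk : k ≤ cs.length) :
    (nxtList cs i n)[k]? = some (fnA (cs.drop k) (i + k)) := by
  induction cs generalizing i k with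
  | nil =>
    have hk0 : k = 0 := Nat.le_zero.mp hk
    subst hk0
    simp [nxtList, fnA, hn]
  | cons c rest ih =>
    match k with
    | 0 =>
      by_cases hc : c = 'A'
      · have ht := ih (i + 1) 0 (by push_cast [List.length_cons] at hn ⊢; omega) (Nat.zero_le _)
        have hh : (nxtList rest (i + 1) n).headI = fnA rest (i + 1) := by
          cases h : nxtList rest (i + 1) n with
          | nil =>
            have := nxtList_length rest (i + 1) n
            rw [h] at this; simp at this
          | cons a t =>
            rw [h] at ht; simp at ht
            simpa using ht
        simp [nxtList, fnA, hc, hh]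
      · simp [nxtList, fnA, hc]
    | k + 1 =>
      have := ih (i + 1) k (by push_cast [List.length_cons] at hn ⊢; omega) (by simpa using hk)
      simp only [nxtList, List.drop_succ_cons, List.getElem?_cons_succ]
      rw [this]
      congr 2
      push_cast
      ring

theorem solWhile_eq (cs : List Char) :
    ∀ (k : Nat) (j : Int), 0 ≤ j → ((cs.length : Int) - j).toNat = k →
      solWhile cs (cs.length : Int) j = fnA (cs.drop j.toNat) j := by
  intro k
  induction k with
  | zero =>
    intro j hj hk
    have hge : (cs.length : Int) ≤ j := by omega
    rw [solWhile]
    have hdrop : cs.drop j.toNat = [] := by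
      apply List.drop_eq_nil_of_le; omega
    simp [hdrop, fnA]
    omega
  | succ k ih =>
    intro j hj hk
    have hlt : j < (cs.length : Int) := by omega
    have hjn : j.toNat < cs.length := by omega
    have hget : PySem.List.pyGet? cs j = some cs[j.toNat] :=
      PySem.List.pyGet?_eq_some_getElem cs hj hlt
    have hdrop : cs.drop j.toNat = cs[j.toNat] :: cs.drop (j.toNat + 1) :=
      List.drop_eq_getElem_cons hjn
    rw [solWhile, hdrop]
    by_cases hc : cs[j.toNat] = 'A'
    · have hrec := ih (j + 1) (by omega) (by omega)
      have ht : (j + 1).toNat = j.toNat + 1 := by omega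
      simp [hlt, hget, hc, fnA, hrec, ht]
    · simp [hget, hc, fnA]

theorem foldl_pair_split (l : List Int) (g m : Int → Int) (a b : Int) :
    l.foldl (fun (st : Int × Int) cur => (st.1 + g cur, min st.2 (m cur))) (a, b)
      = (a + (l.map g).sum, l.foldl (fun x cur => min x (m cur)) b) := by
  induction l generalizing a b with
  | nil => simp
  | cons x t ih => simp [ih, add_assoc]

theorem solution_eq_alt (name : String) : solution name = solution_alt name := by
  unfold solution solution_alt
  dsimp only
  rw [foldl_pair_split (PySem.List.pyRange 0 (name.toList.length : Int) 1)
      (fun cur => min (((PySem.List.pyGetD name.toList cur 'A').toNat : Int) - ('A'.toNat : Int))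
        (('Z'.toNat : Int) - ((PySem.List.pyGetD name.toList cur 'A').toNat : Int) + 1))
      (fun cur => cur + ((name.toList.length : Int) - solWhile name.toList (name.toList.length : Int) (cur + 1))
        + min cur ((name.toList.length : Int) - solWhile name.toList (name.toList.length : Int) (cur + 1)))]
  dsimp only
  congr 1
  · -- alpha part
    conv_rhs => rw [← PySem.List.map_pyGetD_pyRange_zero' name.toList 'A']
    rw [List.map_map, zero_add]
    rfl
  · -- move part
    apply PySem.List.foldl_congr_mem
    intro acc cur hcur
    have hmem := (PySem.List.mem_pyRange_one).mp hcur
    have h1 : solWhile name.toList (name.toList.length : Int) (cur + 1)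
        = fnA (name.toList.drop (cur + 1).toNat) (cur + 1) :=
      solWhile_eq name.toList (((name.toList.length : Int) - (cur + 1)).toNat) (cur + 1)
        (by omega) rfl
    have hlen := nxtList_length name.toList 0 (name.toList.length : Int)
    have h2 : PySem.List.pyGetD (nxtList name.toList 0 (name.toList.length : Int)) (cur + 1) (name.toList.length : Int)
        = fnA (name.toList.drop (cur + 1).toNat) (cur + 1) := by
      rw [PySem.List.pyGetD_eq_getElem _ _ (by omega) (by rw [hlen]; push_cast; omega)]
      have hg := nxtList_get name.toList 0 (name.toList.length : Int) (cur + 1).toNat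
        (by simp) (by omega)
      have hb : (cur + 1).toNat < (nxtList name.toList 0 (name.toList.length : Int)).length := by
        rw [hlen]; omega
      rw [List.getElem?_eq_getElem hb] at hg
      rw [Option.some.inj hg]
      congr 1
      omega
    rw [h1, h2]

-- ===== VERDICT (by name: the statement is the Claim_ definition above) =====
theorem solution_spec : Claim_equal_solution := by
  intro name _
  unfold Spec_solution
  exact solution_eq_alt name
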